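-- pv_equiv track=rewrite | github.com/k2koo/daily_Algorithm | 프로그래머스/2/42586. 기능개발/기능개발.py | solution
-- ===== SOURCE A (Python) =====
-- def solution(progresses, speeds):
--     answer = []
--     rest = []
--     for i in range(len(progresses)):
--         remain = (100 - progresses[i]) % speeds[i]
--         if remain == 0:
--             days = (100 - progresses[i]) // speeds[i]
--         else:
--             days = (100 - progresses[i]) // speeds[i] +1
--         rest.append(days)
--     while rest:
--         current = rest[0]
--         count = 0
--
--         while rest and current >= rest[0]:
--             rest.pop(0)
--             count += 1
--
--         answer.append(count)
--
--     return answer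
-- ===== SOURCE B (Python) =====
-- def solution(progresses, speeds):
--     answer = []
--     threshold = None
--     for p, s in zip(progresses, speeds):
--         days = -((p - 100) // s)  # ceil((100 - p) / s) via floor division
--         if threshold is None or days > threshold:
--             answer.append(1)
--             threshold = days
--         else:
--             answer[-1] += 1
--     return answer
-- ===== Notes on version B (the rewrite author's own statement) =====
-- stated objective: faster
-- what changed: Replaces A's days-list plus quadratic while-loop grouping with rest.pop(0) by a single zip pass that tracks the current group's day threshold and increments the last counter in place.
import Mathlib
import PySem

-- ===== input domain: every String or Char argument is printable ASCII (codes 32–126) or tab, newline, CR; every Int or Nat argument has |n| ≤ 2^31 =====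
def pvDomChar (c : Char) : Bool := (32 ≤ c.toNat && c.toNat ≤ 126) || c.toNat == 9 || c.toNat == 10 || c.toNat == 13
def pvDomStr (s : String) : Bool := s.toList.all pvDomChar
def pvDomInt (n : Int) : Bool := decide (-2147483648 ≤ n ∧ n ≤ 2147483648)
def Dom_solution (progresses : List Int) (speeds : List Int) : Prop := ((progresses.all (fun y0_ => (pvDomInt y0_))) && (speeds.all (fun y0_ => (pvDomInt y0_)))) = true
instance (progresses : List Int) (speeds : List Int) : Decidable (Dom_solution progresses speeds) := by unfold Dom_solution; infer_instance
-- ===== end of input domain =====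

-- B replaces A's quadratic pop(0) grouping by a single zip pass tracking the current
-- group's day threshold; equivalence of the RETURN value is proved on Pre_solution.

-- ===== PORT A =====
-- first loop of A: days list built by indexing (none = IndexError / ZeroDivisionError)
def pvDays (progresses : List Int) (speeds : List Int) : Option (List Int) :=
  (PySem.List.pyRange 0 (progresses.length : Int)).foldl
    (fun acc i =>
      match acc with
      | none => none
      | some rest =>
        match PySem.List.pyGet? progresses i, PySem.List.pyGet? speeds i with
        | some prog, some sp =>
          match PySem.Int.mod? (100 - prog) sp, PySem.Int.floordiv? (100 - prog) sp with
          | some remain, some q => some (rest ++ [if remain = 0 then q else q + 1])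
          | _, _ => none
        | _, _ => none)
    (some [])

-- inner while: pop while current >= rest[0]; returns (count, remaining rest)
def pvInner (current : Int) : List Int → Int × List Int
  | [] => (0, [])
  | x :: t =>
    if current ≥ x then
      let r := pvInner current t
      (r.1 + 1, r.2)
    else (0, x :: t)

-- needed by pvOuter's termination proof
theorem pvInner_length (current : Int) (l : List Int) :
    (pvInner current l).2.length ≤ l.length := by
  induction l with
  | nil => simp [pvInner]
  | cons x t ih =>
    simp only [pvInner]
    split
    · simpa using Nat.le_succ_of_le ih
    · simp

-- outer while of A
def pvOuter : List Int → List Int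
  | [] => []
  | c :: t =>
    let r := pvInner c (c :: t)
    r.1 :: pvOuter r.2
termination_by l => l.length
decreasing_by
  simp only [pvInner, ge_iff_le, le_refl, if_true]
  have := pvInner_length c t
  simpa using Nat.lt_succ_of_le this

def solution (progresses : List Int) (speeds : List Int) : List Int :=
  match pvDays progresses speeds with
  | some rest => pvOuter rest
  | none => []   -- unreachable under Pre_solution: Python raises there

-- ===== PORT B =====
-- state = none (before first feature) | some (threshold, last count, earlier counts reversed)
def pvAltLoop : List (Int × Int) → Option (Int × Int × List Int) → List Int
  | [], none => []
  | [], some (_, n, earlier) => (n :: earlier).reverse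
  | (p, s) :: t, st =>
    let days := -(PySem.Int.floordiv (p - 100) s)
    match st with
    | none => pvAltLoop t (some (days, 1, []))
    | some (c, n, earlier) =>
      if days > c then pvAltLoop t (some (days, 1, n :: earlier))
      else pvAltLoop t (some (c, n + 1, earlier))

def solution_alt (progresses : List Int) (speeds : List Int) : List Int :=
  pvAltLoop (progresses.zip speeds) none

-- ===== PRECONDITION & SPEC =====
-- Pre_ excludes exactly the inputs where A raises: a speeds list shorter than progresses
-- (IndexError) or a zero speed among the used ones (ZeroDivisionError).
def Pre_solution (progresses : List Int) (speeds : List Int) : Prop :=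
  progresses.length ≤ speeds.length ∧ ∀ x ∈ speeds.take progresses.length, x ≠ 0
instance (progresses : List Int) (speeds : List Int) : Decidable (Pre_solution progresses speeds) := by
  unfold Pre_solution; infer_instance

def pvWitness_solution : List Int × List Int := ([93, 30, 55], [1, 30, 5])

def Spec_solution (progresses : List Int) (speeds : List Int) (out : List Int) : Prop :=
  out = solution_alt progresses speeds
instance (progresses : List Int) (speeds : List Int) (out : List Int) : Decidable (Spec_solution progresses speeds out) := by
  unfold Spec_solution; infer_instance

-- ===== CLAIM (what is proved, stated in full; the proofs are below) =====
def Claim_equal_solution : Prop := ∀ (progresses : List Int) (speeds : List Int), Dom_solution progresses speeds → Pre_solution progresses speeds → Spec_solution progresses speeds (solution progresses speeds)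

-- ===== LEMMAS AND PROOFS =====

-- A's per-feature day count
def pvDayA (pr sp : Int) : Int :=
  if PySem.Int.mod (100 - pr) sp = 0 then PySem.Int.floordiv (100 - pr) sp
  else PySem.Int.floordiv (100 - pr) sp + 1

-- B's per-feature day count
def pvDayB (x : Int × Int) : Int := -(PySem.Int.floordiv (x.1 - 100) x.2)

-- common grouping of a days list
def pvGroup : List Int → List Int
  | [] => []
  | c :: t =>
    (1 + ((t.takeWhile (fun x => x ≤ c)).length : Int)) :: pvGroup (t.dropWhile (fun x => x ≤ c))
termination_by l => l.length
decreasing_by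
  have := List.length_dropWhile_le (fun x => decide (x ≤ c)) t
  simpa using Nat.lt_succ_of_le this

theorem pvInner_eq (c : Int) (l : List Int) :
    pvInner c l = (((l.takeWhile (fun x => x ≤ c)).length : Int), l.dropWhile (fun x => x ≤ c)) := by
  induction l with
  | nil => simp [pvInner]
  | cons x t ih =>
    by_cases h : x ≤ c
    · simp [pvInner, h, ih]
    · simp [pvInner, h]

theorem pvOuter_eq_group_aux : ∀ (n : Nat) (l : List Int), l.length ≤ n → pvOuter l = pvGroup l := by
  intro n
  induction n with
  | zero =>
    intro l hl
    have : l = [] := List.length_eq_zero_iff.mp (Nat.le_zero.mp hl)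
    subst this
    simp [pvOuter, pvGroup]
  | succ n ih =>
    intro l hl
    cases l with
    | nil => simp [pvOuter, pvGroup]
    | cons c t =>
      rw [pvOuter, pvGroup, pvInner_eq]
      simp only [List.takeWhile_cons, List.dropWhile_cons, decide_eq_true_eq, le_refl,
        if_true, List.length_cons]
      rw [ih _ (le_trans (List.length_dropWhile_le _ t) (by simp at hl; omega))]
      congr 1
      push_cast
      ring

theorem pvAltLoop_cons_none (p s : Int) (t : List (Int × Int)) :
    pvAltLoop ((p, s) :: t) none =
      pvAltLoop t (some (-(PySem.Int.floordiv (p - 100) s), 1, [])) := rfl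

theorem pvAltLoop_cons_some (p s : Int) (t : List (Int × Int)) (c n : Int) (earlier : List Int) :
    pvAltLoop ((p, s) :: t) (some (c, n, earlier)) =
      if -(PySem.Int.floordiv (p - 100) s) > c then
        pvAltLoop t (some (-(PySem.Int.floordiv (p - 100) s), 1, n :: earlier))
      else pvAltLoop t (some (c, n + 1, earlier)) := rfl

theorem pvAlt_inv (t : List (Int × Int)) : ∀ (c n : Int) (earlier : List Int),
    pvAltLoop t (some (c, n, earlier)) =
      earlier.reverse ++ (n + (((t.map pvDayB).takeWhile (fun x => x ≤ c)).length : Int)) ::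
        pvGroup ((t.map pvDayB).dropWhile (fun x => x ≤ c)) := by
  induction t with
  | nil => intro c n earlier; simp [pvAltLoop, pvGroup]
  | cons hd tl ih =>
    intro c n earlier
    obtain ⟨p, s⟩ := hd
    rw [pvAltLoop_cons_some]
    by_cases h : pvDayB (p, s) ≤ c
    · rw [if_neg (by simp [pvDayB] at h ⊢; omega)]
      rw [ih]
      simp only [List.map_cons, List.takeWhile_cons, List.dropWhile_cons, h, decide_true,
        if_true, List.length_cons]
      congr 2
      push_cast
      ring
    · rw [if_pos (by simp [pvDayB] at h ⊢; omega)]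
      rw [ih]
      simp only [List.map_cons, List.takeWhile_cons, List.dropWhile_cons, h, decide_false,
        Bool.false_eq_true, if_false, List.length_nil, List.reverse_cons]
      rw [pvGroup]
      simp only [Nat.cast_zero, add_zero, List.append_assoc, List.cons_append,
        List.nil_append, pvDayB]
      rfl

theorem pvAlt_eq_group (pairs : List (Int × Int)) :
    pvAltLoop pairs none = pvGroup (pairs.map pvDayB) := by
  cases pairs with
  | nil => simp [pvAltLoop, pvGroup]
  | cons hd tl =>
    obtain ⟨p, s⟩ := hd
    rw [pvAltLoop_cons_none, pvAlt_inv]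
    simp only [List.map_cons]
    rw [pvGroup]
    simp [pvDayB]
    exact ⟨rfl, rfl⟩

-- ceiling division identity: a//b + (a % b != 0) = -((-a)//b), for 0 < b
theorem pvCeil_pos (a b : Int) (hb : 0 < b) :
    (if PySem.Int.mod a b = 0 then PySem.Int.floordiv a b else PySem.Int.floordiv a b + 1) =
      -(PySem.Int.floordiv (-a) b) := by
  have hqr := PySem.Int.floordiv_mul_add_mod a b
  have hr0 := PySem.Int.mod_nonneg a hb
  have hrlt := PySem.Int.mod_lt a hb
  by_cases h : PySem.Int.mod a b = 0
  · rw [if_pos h]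
    symm
    exact (PySem.Int.neg_floordiv_neg_eq_iff_of_pos hb).mpr
      ⟨by nlinarith, by nlinarith⟩
  · rw [if_neg h]
    symm
    have hr1 : 1 ≤ PySem.Int.mod a b := by omega
    exact (PySem.Int.neg_floordiv_neg_eq_iff_of_pos hb).mpr
      ⟨by nlinarith, by nlinarith⟩

theorem pvDay_eq (pr sp : Int) (h : sp ≠ 0) : pvDayA pr sp = pvDayB (pr, sp) := by
  rcases lt_or_gt_of_ne h with hneg | hpos
  · have hb : 0 < -sp := by omega
    have key := pvCeil_pos (-(100 - pr)) (-sp) hb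
    unfold pvDayA pvDayB
    rw [show PySem.Int.floordiv (100 - pr) sp = PySem.Int.floordiv (-(100 - pr)) (-sp) from
        (PySem.Int.floordiv_neg_neg (100 - pr) sp).symm]
    rw [show PySem.Int.mod (100 - pr) sp = -(PySem.Int.mod (-(100 - pr)) (-sp)) by
        rw [PySem.Int.mod_neg_neg]; ring]
    rw [show PySem.Int.floordiv (pr - 100) sp = PySem.Int.floordiv (-(pr - 100)) (-sp) from
        (PySem.Int.floordiv_neg_neg (pr - 100) sp).symm]
    rw [show -(pr - 100) = -(-(100 - pr)) by ring]
    rw [← key]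
    simp [neg_eq_zero]
  · unfold pvDayA pvDayB
    have key := pvCeil_pos (100 - pr) sp hpos
    rw [show pr - 100 = -(100 - pr) by ring]
    exact key

theorem pvZipTake : ∀ (p s : List Int), p.zip (s.take p.length) = p.zip s := by
  intro p
  induction p with
  | nil => intro s; simp
  | cons a p ih =>
    intro s
    cases s with
    | nil => simp
    | cons b s => simp [List.zip_cons_cons, ih]

-- the first loop of A computes the days list (under Pre_)
theorem pvDays_eq (progresses speeds : List Int) : ∀ (n : Nat),
    n ≤ progresses.length → n ≤ speeds.length →
    (∀ x ∈ speeds.take n, x ≠ 0) →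
    (PySem.List.pyRange 0 (n : Int)).foldl
      (fun acc i =>
        match acc with
        | none => none
        | some rest =>
          match PySem.List.pyGet? progresses i, PySem.List.pyGet? speeds i with
          | some prog, some sp =>
            match PySem.Int.mod? (100 - prog) sp, PySem.Int.floordiv? (100 - prog) sp with
            | some remain, some q => some (rest ++ [if remain = 0 then q else q + 1])
            | _, _ => none
          | _, _ => none)
      (some []) =
      some (((progresses.take n).zip (speeds.take n)).map (fun x => pvDayA x.1 x.2)) := by
  intro n
  induction n with
  | zero => intro _ _ _; simp [PySem.List.pyRange]
  | succ n ih =>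
    intro hp hs hnz
    have hp' : n ≤ progresses.length := by omega
    have hs' : n ≤ speeds.length := by omega
    have hnz' : ∀ x ∈ speeds.take n, x ≠ 0 := by
      intro x hx
      exact hnz x ((List.take_prefix n (speeds.take (n+1))).subset (by
        rwa [List.take_take, min_eq_left (by omega)]))
    have hrange : PySem.List.pyRange 0 ((n + 1 : Nat) : Int) =
        PySem.List.pyRange 0 (n : Int) ++ [(n : Int)] := by
      push_cast
      exact PySem.List.pyRange_one_succ_right (by positivity)
    rw [hrange, List.foldl_append, ih hp' hs' hnz']
    have hpn : n < progresses.length := by omega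
    have hsn : n < speeds.length := by omega
    have hgp : PySem.List.pyGet? progresses (n : Int) = some progresses[n] := by
      rw [PySem.List.pyGet?_natCast]; simp [hpn]
    have hgs : PySem.List.pyGet? speeds (n : Int) = some speeds[n] := by
      rw [PySem.List.pyGet?_natCast]; simp [hsn]
    have hsnz : speeds[n] ≠ 0 := by
      apply hnz
      rw [List.mem_take_iff_getElem]
      exact ⟨n, by omega, by simp⟩
    simp only [List.foldl_cons, List.foldl_nil, hgp, hgs]
    rw [show PySem.Int.mod? (100 - progresses[n]) speeds[n] =
          some (PySem.Int.mod (100 - progresses[n]) speeds[n]) by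
        simp [PySem.Int.mod?, PySem.Int.mod, hsnz]]
    rw [show PySem.Int.floordiv? (100 - progresses[n]) speeds[n] =
          some (PySem.Int.floordiv (100 - progresses[n]) speeds[n]) by
        simp [PySem.Int.floordiv?, PySem.Int.floordiv, hsnz]]
    rw [List.take_add_one, List.take_add_one]
    rw [List.zip_append (by simp [hpn.le, hsn.le])]
    simp [hpn, hsn, pvDayA]

-- ===== VERDICT (by name: the statement is the Claim_ definition above) =====
theorem solution_spec : Claim_equal_solution := by
  intro progresses speeds _ hpre
  obtain ⟨hlen, hnz⟩ := hpre
  have hd : pvDays progresses speeds =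
      some (((progresses.zip (speeds.take progresses.length))).map (fun x => pvDayA x.1 x.2)) := by
    unfold pvDays
    rw [pvDays_eq progresses speeds progresses.length le_rfl hlen hnz, List.take_length]
  unfold Spec_solution solution solution_alt
  rw [pvAlt_eq_group, ← pvZipTake progresses speeds]
  simp only [hd]
  rw [pvOuter_eq_group_aux (((progresses.zip (speeds.take progresses.length)).map
      (fun x => pvDayA x.1 x.2)).length) _ le_rfl]
  congr 1
  apply List.map_congr_left
  intro x hx
  obtain ⟨x1, x2⟩ := x
  exact pvDay_eq x1 x2 (hnz x2 (List.of_mem_zip hx).2)
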